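-- pv_equiv track=rewrite | github.com/DragunWF/Competitive-Programming | LeetCode/Medium/find_and_replace_pattern.py | standardizeStr
-- ===== SOURCE A (Python) =====
-- from typing import List
--
-- def standardizeStr(word: str) -> List[int]:
--     letterMap = {}
--     standardizedValue = []
--     for char in word:
--         if char in letterMap:
--             standardizedValue.append(letterMap[char])
--         else:
--             letterMap[char] = hex(len(letterMap))
--             standardizedValue.append(letterMap[char])
--     return "".join(standardizedValue)
-- ===== SOURCE B (Python) =====
-- def standardizeStr(word: str) -> str:
--     # The code of a character is hex(k) where k is the number of distinct
--     # characters appearing strictly before its first occurrence: no mapping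
--     # table, each output piece is computed independently from the word itself.
--     return "".join(hex(len(set(word[:word.index(c)]))) for c in word)
-- ===== Notes on version B (the rewrite author's own statement) =====
-- stated objective: alternative
-- what changed: A builds a char-to-code dict incrementally in one stateful branching pass; B keeps no state at all and computes each output piece independently by a closed per-character formula: hex of the number of distinct characters strictly before the character's first occurrence, via word.index(c) and set(word[:j]).
import Mathlib
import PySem

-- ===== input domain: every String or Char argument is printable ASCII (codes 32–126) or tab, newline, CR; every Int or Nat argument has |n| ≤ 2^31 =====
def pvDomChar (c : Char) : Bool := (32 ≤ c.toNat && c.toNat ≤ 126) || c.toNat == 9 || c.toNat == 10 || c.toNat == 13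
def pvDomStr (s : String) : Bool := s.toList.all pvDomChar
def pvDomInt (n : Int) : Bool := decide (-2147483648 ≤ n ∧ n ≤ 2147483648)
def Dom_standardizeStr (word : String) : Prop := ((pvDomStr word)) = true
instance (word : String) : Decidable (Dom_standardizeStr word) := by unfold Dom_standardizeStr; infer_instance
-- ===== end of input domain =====

-- B replaces A's stateful dict-building pass by a stateless per-character formula:
-- each character's code is hex of the number of distinct characters strictly before
-- its first occurrence; alternative decomposition, no speed claim.

-- shared helper: Python's hex(n) for n ≥ 0 (both A and B call hex on non-negative lengths)
def hexDigit (n : Nat) : Char := if n < 10 then Char.ofNat (48 + n) else Char.ofNat (87 + n)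

def hexChars (n : Nat) : List Char :=
  if n < 16 then [hexDigit n]
  else hexChars (n / 16) ++ [hexDigit (n % 16)]
  decreasing_by exact Nat.div_lt_self (by omega) (by omega)

def pyHex (n : Nat) : List Char := '0' :: 'x' :: hexChars n

-- ===== PORT A =====
-- one loop step of A: branch on membership in letterMap, else insert hex(len(letterMap)); append the value
def aStep (st : PySem.Dict Char (List Char) × List (List Char)) (c : Char) :
    PySem.Dict Char (List Char) × List (List Char) :=
  if st.1.contains c then (st.1, st.2 ++ [st.1.getD c []])
  else (st.1.insert c (pyHex st.1.size), st.2 ++ [pyHex st.1.size])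

def standardizeStr (word : String) : String :=
  let res := word.toList.foldl aStep (PySem.Dict.empty, [])
  String.ofList (PySem.Chars.join [] res.2)   -- "".join(standardizedValue)

-- ===== PORT B =====
def standardizeStr_alt (word : String) : String :=
  let cs := word.toList
  String.ofList (PySem.Chars.join [] (cs.map (fun c =>
    -- word.index(c) never raises here: c is drawn from word, so .getD 0 is the total form
    let j := (PySem.List.index? cs c).getD 0
    -- hex(len(set(word[:j])))
    pyHex (PySem.Set.ofList (PySem.List.slice cs none (some (j : Int)))).length)))

-- ===== PRECONDITION & SPEC =====
def Spec_standardizeStr (word : String) (out : String) : Prop := out = standardizeStr_alt word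
instance (word : String) (out : String) : Decidable (Spec_standardizeStr word out) := by unfold Spec_standardizeStr; infer_instance

-- ===== CLAIM (what is proved, stated in full; the proofs are below) =====
def Claim_equal_standardizeStr : Prop := ∀ (word : String), Dom_standardizeStr word → Spec_standardizeStr word (standardizeStr word)

-- ===== LEMMAS AND PROOFS =====

-- the association list {order[k] ↦ hex(i+k)} that A's dict materialises
def pairsHex : List Char → Nat → List (Char × List Char)
  | [], _ => []
  | c :: r, i => (c, pyHex i) :: pairsHex r (i + 1)

theorem length_pairsHex (xs : List Char) (i : Nat) : (pairsHex xs i).length = xs.length := by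
  induction xs generalizing i with
  | nil => rfl
  | cons c r ih => simp [pairsHex, ih]

theorem pairsHex_append (xs : List Char) (c : Char) (i : Nat) :
    pairsHex (xs ++ [c]) i = pairsHex xs i ++ [(c, pyHex (i + xs.length))] := by
  induction xs generalizing i with
  | nil => simp [pairsHex]
  | cons d r ih => simp [pairsHex, ih, Nat.add_assoc, Nat.add_comm 1 r.length]

theorem get?_pairsHex (seen : List Char) (i : Nat) (c : Char) :
    (PySem.Dict.mk (pairsHex seen i)).get? c =
      if c ∈ seen then some (pyHex (i + List.idxOf c seen)) else none := by
  induction seen generalizing i with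
  | nil => simp [pairsHex, PySem.Dict.get?]
  | cons d r ih =>
    rw [pairsHex, PySem.Dict.get?_mk_cons]
    by_cases hdc : d = c
    · subst hdc; simp [List.idxOf_cons_self]
    · simp only [beq_iff_eq, hdc, if_false, ih, List.mem_cons]
      by_cases hm : c ∈ r
      · rw [List.idxOf_cons_ne r hdc]
        have h2 : i + 1 + List.idxOf c r = i + (List.idxOf c r).succ := by omega
        simp [hm, h2]
      · simp [hm, Ne.symm hdc]

theorem contains_pairsHex_of_not_mem (seen : List Char) (i : Nat) (c : Char) (h : c ∉ seen) :
    (PySem.Dict.mk (pairsHex seen i)).contains c = false := by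
  rw [PySem.Dict.contains_eq_isSome_get?, get?_pairsHex, if_neg h]; rfl

-- index of a char is frozen once it is in the prefix of the final first-occurrence order
theorem idxOf_update_of_mem (seen rest : List Char) (c : Char) (h : c ∈ seen) :
    List.idxOf c (PySem.Set.update seen rest) = List.idxOf c seen := by
  rw [PySem.Set.update_eq_append_filter]
  exact List.idxOf_append_of_mem h

-- A's loop, on a state whose dict is the pairsHex table of the chars seen so far
theorem aLoop (rest : List Char) :
    ∀ (seen : List Char) (acc : List (List Char)),
    rest.foldl aStep (PySem.Dict.mk (pairsHex seen 0), acc)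
      = (PySem.Dict.mk (pairsHex (PySem.Set.update seen rest) 0),
         acc ++ rest.map (fun c => pyHex (List.idxOf c (PySem.Set.update seen rest)))) := by
  induction rest with
  | nil => intro seen acc; simp [PySem.Set.update_nil]
  | cons c rest ih =>
    intro seen acc
    rw [List.foldl_cons]
    by_cases hm : c ∈ seen
    · have hct : (PySem.Dict.mk (pairsHex seen 0)).contains c = true := by
        rw [PySem.Dict.contains_eq_isSome_get?, get?_pairsHex, if_pos hm]; rfl
      have hupd : PySem.Set.update seen (c :: rest) = PySem.Set.update seen rest := by
        rw [PySem.Set.update_cons, PySem.Set.add_of_mem hm]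
      have hgd : (PySem.Dict.mk (pairsHex seen 0)).getD c [] = pyHex (List.idxOf c seen) := by
        rw [PySem.Dict.getD_eq_get?_getD, get?_pairsHex, if_pos hm]; simp
      rw [aStep, hct, if_pos rfl, hgd, ih seen, hupd, List.map_cons,
        idxOf_update_of_mem seen rest c hm]
      simp [List.append_assoc]
    · have hcf := contains_pairsHex_of_not_mem seen 0 c hm
      have hsz : (PySem.Dict.mk (pairsHex seen 0)).size = seen.length := by
        simp [PySem.Dict.size, length_pairsHex]
      have hins : (PySem.Dict.mk (pairsHex seen 0)).insert c (pyHex seen.length)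
          = PySem.Dict.mk (pairsHex (seen ++ [c]) 0) := by
        apply PySem.Dict.ext
        rw [PySem.Dict.items_insert_of_not_contains _ _ hcf, pairsHex_append]
        simp
      have hupd : PySem.Set.update seen (c :: rest) = PySem.Set.update (seen ++ [c]) rest := by
        rw [PySem.Set.update_cons, PySem.Set.add_of_not_mem hm]
      have hidx : List.idxOf c (PySem.Set.update (seen ++ [c]) rest) = seen.length := by
        rw [idxOf_update_of_mem _ _ _ (by simp), List.idxOf_append_of_notMem hm,
          List.idxOf_cons_self]
        omega
      rw [aStep, hcf, if_neg (by simp), hsz, hins, ih (seen ++ [c]), hupd, List.map_cons, hidx]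
      simp [List.append_assoc]

-- B's per-character formula: the distinct chars of the prefix before c's first
-- occurrence are exactly the chars ranked before c in first-appearance order
theorem bChar (cs : List Char) (c : Char) (hc : c ∈ cs) :
    (PySem.Set.ofList (cs.take ((PySem.List.index? cs c).getD 0))).length
      = List.idxOf c (PySem.Set.ofList cs) := by
  obtain ⟨j, hj⟩ := (PySem.List.index?_isSome_iff cs c).mpr hc |> Option.isSome_iff_exists.mp
  obtain ⟨pre, suf, hsplit, hlen, hpre⟩ := (PySem.List.index?_eq_some_iff cs c j).mp hj
  rw [hj]
  simp only [Option.getD_some]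
  subst hsplit hlen
  rw [List.take_left]
  have hnotmem : c ∉ PySem.Set.ofList pre := by
    rw [PySem.Set.mem_ofList]; exact hpre
  have h1 : PySem.Set.ofList (pre ++ c :: suf)
      = PySem.Set.update (PySem.Set.ofList pre ++ [c]) suf := by
    rw [PySem.Set.ofList_append, PySem.Set.update_cons, PySem.Set.add_of_not_mem hnotmem]
  rw [h1, idxOf_update_of_mem _ _ _ (by simp), List.idxOf_append_of_notMem hnotmem,
    List.idxOf_cons_self, Nat.add_zero]

-- ===== VERDICT (by name: the statement is the Claim_ definition above) =====
theorem standardizeStr_spec : Claim_equal_standardizeStr := by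
  intro word _
  unfold Spec_standardizeStr standardizeStr standardizeStr_alt
  dsimp only
  rw [show (PySem.Dict.empty : PySem.Dict Char (List Char)) = PySem.Dict.mk (pairsHex [] 0) from rfl]
  rw [aLoop word.toList [] []]
  simp only [PySem.Set.update_nil_left, List.nil_append]
  congr 2
  apply List.map_congr_left
  intro c hc
  have hj : (0 : Int) ≤ ((PySem.List.index? word.toList c).getD 0 : Nat) := Int.natCast_nonneg _
  rw [PySem.List.slice_to_natCast, bChar word.toList c hc]
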